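-- pv_equiv track=rewrite | github.com/xyloforce/graph_problem | utilities.py | create_incompatibilities
-- ===== SOURCE A (Python) =====
-- def create_incompatibilities(species_dict):
--     incompatibility = dict() # each char and his same characters
--     pos_by_char = dict()
--     for i in species_dict:
--         for j in species_dict[i]: # j is a state in the species i
--             index = species_dict[i].index(j)
--             if j not in pos_by_char: # ensure proper initialization
--                 pos_by_char[j] = set()
--             pos_by_char[j].add(index) # add value to set in order to avoid duplicates
--     for i in pos_by_char:
--         if i not in incompatibility:
--             incompatibility[i]=set()
--         for j in pos_by_char:
--             if i != j and pos_by_char[i]==pos_by_char[j]: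
--                 incompatibility[i].add(j)
--     return incompatibility
-- ===== SOURCE B (Python) =====
-- def create_incompatibilities(species_dict):
--     pos_by_char = {}
--     for lst in species_dict.values():
--         firsts = {}
--         for idx, ch in enumerate(lst):
--             if ch not in firsts:
--                 firsts[ch] = idx
--         for ch, idx in firsts.items():
--             pos_by_char.setdefault(ch, set()).add(idx)
--     groups = {}
--     for ch, idxs in pos_by_char.items():
--         groups.setdefault(tuple(sorted(idxs)), []).append(ch)
--     result = {}
--     for ch, idxs in pos_by_char.items():
--         members = groups[tuple(sorted(idxs))]
--         result[ch] = {x for x in members if x != ch}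
--     return result
-- ===== Notes on version B (the rewrite author's own statement) =====
-- stated objective: alternative
-- what changed: B computes each character's first index with a single enumerate pass per species instead of calling list.index for every occurrence, and groups characters by their sorted index-set in a dict instead of comparing every pair of characters' index sets.
import Mathlib
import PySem

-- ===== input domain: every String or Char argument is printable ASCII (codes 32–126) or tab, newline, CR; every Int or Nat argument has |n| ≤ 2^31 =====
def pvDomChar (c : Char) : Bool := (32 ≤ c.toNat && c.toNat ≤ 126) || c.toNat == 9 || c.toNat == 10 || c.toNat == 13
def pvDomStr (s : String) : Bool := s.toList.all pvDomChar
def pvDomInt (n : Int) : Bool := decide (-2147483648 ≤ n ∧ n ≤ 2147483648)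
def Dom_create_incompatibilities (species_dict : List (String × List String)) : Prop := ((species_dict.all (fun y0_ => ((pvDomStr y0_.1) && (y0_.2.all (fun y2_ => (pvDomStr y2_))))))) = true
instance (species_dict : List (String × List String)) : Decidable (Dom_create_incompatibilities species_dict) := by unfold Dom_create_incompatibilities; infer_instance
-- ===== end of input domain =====

-- B replaces A's repeated list.index scans by a single enumerate pass per species and
-- replaces A's all-pairs set comparison by grouping characters under their sorted index-set.

-- ===== PORT A =====
def create_incompatibilities (species_dict : List (String × List String)) : List (String × List String) :=
  let d := PySem.Dict.ofList species_dict
  let pos := d.items.foldl (fun pos p =>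
    (d.getD p.1 []).foldl (fun pos j =>
      let index : Int := (((PySem.List.index? (d.getD p.1 []) j).getD 0 : Nat) : Int)
      let pos := if pos.contains j then pos else pos.insert j PySem.Set.empty
      pos.modify j PySem.Set.empty (fun s => PySem.Set.add s index)) pos)
    (PySem.Dict.empty : PySem.Dict String (PySem.Set Int))
  let inc := pos.keys.foldl (fun inc i =>
    let inc := if inc.contains i then inc else inc.insert i PySem.Set.empty
    pos.keys.foldl (fun inc j =>
      if i ≠ j ∧ PySem.Set.equal (pos.getD i PySem.Set.empty) (pos.getD j PySem.Set.empty) then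
        inc.modify i PySem.Set.empty (fun s => PySem.Set.add s j)
      else inc) inc) (PySem.Dict.empty : PySem.Dict String (PySem.Set String))
  inc.items

-- ===== PORT B =====
-- tuple(sorted(idxs)) : the grouping key of an index set
def pvKey (idxs : PySem.Set Int) : List Int := PySem.List.sorted idxs (fun x => x) false

def create_incompatibilities_alt (species_dict : List (String × List String)) : List (String × List String) :=
  let d := PySem.Dict.ofList species_dict
  let pos := d.items.foldl (fun pos p =>
    let firsts := (PySem.List.enumerate p.2 0).foldl (fun f q =>
      if f.contains q.2 then f else f.insert q.2 q.1) (PySem.Dict.empty : PySem.Dict String Int)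
    firsts.items.foldl (fun pos q =>
      (pos.setdefault q.1 PySem.Set.empty).modify q.1 PySem.Set.empty (fun s => PySem.Set.add s q.2)) pos)
    (PySem.Dict.empty : PySem.Dict String (PySem.Set Int))
  let groups := pos.items.foldl (fun g p =>
    g.modify (pvKey p.2) [] (fun l => l ++ [p.1])) (PySem.Dict.empty : PySem.Dict (List Int) (List String))
  let res := pos.items.foldl (fun r p =>
    let members := groups.getD (pvKey p.2) []
    r.insert p.1 (PySem.Set.ofList (members.filter (fun x => x ≠ p.1)))) (PySem.Dict.empty : PySem.Dict String (PySem.Set String))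
  res.items

-- ===== PRECONDITION & SPEC =====
def Spec_create_incompatibilities (species_dict : List (String × List String)) (out : List (String × List String)) : Prop := out = create_incompatibilities_alt species_dict
instance (species_dict : List (String × List String)) (out : List (String × List String)) : Decidable (Spec_create_incompatibilities species_dict out) := by unfold Spec_create_incompatibilities; infer_instance

-- ===== CLAIM (what is proved, stated in full; the proofs are below) =====
def Claim_equal_create_incompatibilities : Prop := ∀ (species_dict : List (String × List String)), Dom_create_incompatibilities species_dict → Spec_create_incompatibilities species_dict (create_incompatibilities species_dict)


-- ===== LEMMAS AND PROOFS =====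

-- the common "record index i for character j" step that both inner loops perform
def addpos (pos : PySem.Dict String (PySem.Set Int)) (j : String) (i : Int) : PySem.Dict String (PySem.Set Int) :=
  (if pos.contains j then pos else pos.insert j PySem.Set.empty).modify j PySem.Set.empty (fun s => PySem.Set.add s i)

-- lst.index(j), as the Int that A stores
def fIdx (lst : List String) (j : String) : Int := (((PySem.List.index? lst j).getD 0 : Nat) : Int)

-- B's per-species dict of first indices
def firstsD (lst : List String) : PySem.Dict String Int :=
  (PySem.List.enumerate lst 0).foldl (fun f q => if f.contains q.2 then f else f.insert q.2 q.1) PySem.Dict.empty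

-- the pos_by_char dict (shown below to be computed by both ports)
def posOf (species_dict : List (String × List String)) : PySem.Dict String (PySem.Set Int) :=
  (PySem.Dict.ofList species_dict).items.foldl
    (fun pos p => ((PySem.Dict.ofList species_dict).getD p.1 []).foldl
       (fun pos j => addpos pos j (fIdx ((PySem.Dict.ofList species_dict).getD p.1 []) j)) pos)
    PySem.Dict.empty

-- A's comparison condition, as a Bool
def condA (pos : PySem.Dict String (PySem.Set Int)) (i j : String) : Bool :=
  decide (i ≠ j) && PySem.Set.equal (pos.getD i PySem.Set.empty) (pos.getD j PySem.Set.empty)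

-- the common result: for every char k (in pos order), the other chars with the same index set
def valA (pos : PySem.Dict String (PySem.Set Int)) (k : String) : PySem.Set String :=
  PySem.Set.ofList (pos.keys.filter (fun j => condA pos k j))

-- ---- generic fold helpers ----
lemma foldl_pres {α β : Type} (P : β → Prop) (f : β → α → β)
    (hpres : ∀ acc x, P acc → P (f acc x)) :
    ∀ (l : List α) (init : β), P init → P (l.foldl f init) := by
  intro l
  induction l with
  | nil => intro init h; exact h
  | cons x xs ih => intro init h; exact ih _ (hpres _ _ h)

lemma foldl_congr_inv {α β : Type} (P : β → Prop) (f g : β → α → β) (l : List α) (init : β)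
    (hP : P init) (hpres : ∀ acc x, x ∈ l → P acc → P (f acc x))
    (heq : ∀ acc x, x ∈ l → P acc → f acc x = g acc x) :
    l.foldl f init = l.foldl g init := by
  induction l generalizing init with
  | nil => rfl
  | cons x xs ih =>
    simp only [List.foldl_cons]
    rw [← heq init x (by simp) hP]
    exact ih (f init x) (hpres init x (by simp) hP)
      (fun acc y hy => hpres acc y (by simp [hy])) (fun acc y hy => heq acc y (by simp [hy]))

-- ---- addpos facts ----
lemma contains_of_mem_getD {pos : PySem.Dict String (PySem.Set Int)} {c : String} {x : Int}
    (h : x ∈ pos.getD c PySem.Set.empty) : pos.contains c = true := by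
  cases hc : pos.contains c with
  | true => rfl
  | false => rw [PySem.Dict.getD_of_not_contains _ _ hc] at h; cases h

lemma pv_insert_getD_eq {κ ν : Type} [BEq κ] [LawfulBEq κ] (d : PySem.Dict κ ν) (k : κ) (d0 : ν)
    (hnd : d.keys.Nodup) (hc : d.contains k = true) : d.insert k (d.getD k d0) = d := by
  apply PySem.Dict.ext
  rw [PySem.Dict.items_insert_of_contains _ _ hc]
  conv_rhs => rw [← List.map_id d.items]
  apply List.map_congr_left
  intro p hp
  by_cases hpk : p.1 = k
  · have : (k, p.2) ∈ d.items := by rw [← hpk]; exact hp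
    have hv : d.getD k d0 = p.2 := PySem.Dict.getD_of_mem_items d this hnd d0
    simp only [hpk, beq_self_eq_true, if_pos, hv, id]
    exact (Prod.ext hpk.symm rfl)
  · simp [hpk]

lemma mem_addpos_self (pos : PySem.Dict String (PySem.Set Int)) (c : String) (i : Int) :
    i ∈ (addpos pos c i).getD c PySem.Set.empty := by
  unfold addpos
  rw [PySem.Dict.getD_modify_self]
  exact (PySem.Set.mem_add _ _ _).mpr (Or.inr rfl)

lemma mem_getD_addpos {pos : PySem.Dict String (PySem.Set Int)} (j : String) (i : Int)
    {c : String} {x : Int} (h : x ∈ pos.getD c PySem.Set.empty) :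
    x ∈ (addpos pos j i).getD c PySem.Set.empty := by
  unfold addpos
  by_cases hjc : c = j
  · subst hjc
    rw [PySem.Dict.getD_modify_self]
    have hc := contains_of_mem_getD h
    rw [if_pos hc]
    exact (PySem.Set.mem_add _ _ _).mpr (Or.inl h)
  · rw [PySem.Dict.getD_modify_of_ne _ _ _ hjc]
    split
    · exact h
    · rw [PySem.Dict.getD_insert_of_ne _ _ _ hjc]; exact h

lemma addpos_nodup_keys {pos : PySem.Dict String (PySem.Set Int)} (j : String) (i : Int)
    (h : pos.keys.Nodup) : (addpos pos j i).keys.Nodup := by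
  unfold addpos PySem.Dict.modify
  split
  · exact PySem.Dict.nodup_keys_insert _ _ _ h
  · exact PySem.Dict.nodup_keys_insert _ _ _ (PySem.Dict.nodup_keys_insert _ _ _ h)

lemma addpos_nodup_getD {pos : PySem.Dict String (PySem.Set Int)} (j : String) (i : Int)
    (h : ∀ c, (pos.getD c PySem.Set.empty).Nodup) :
    ∀ c, ((addpos pos j i).getD c PySem.Set.empty).Nodup := by
  intro c
  unfold addpos
  by_cases hjc : c = j
  · subst hjc
    rw [PySem.Dict.getD_modify_self]
    apply PySem.Set.nodup_add
    split
    · exact h c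
    · rw [PySem.Dict.getD_insert_self]; exact List.nodup_nil
  · rw [PySem.Dict.getD_modify_of_ne _ _ _ hjc]
    split
    · exact h c
    · rw [PySem.Dict.getD_insert_of_ne _ _ _ hjc]; exact h c

lemma addpos_of_mem {pos : PySem.Dict String (PySem.Set Int)} {c : String} {i : Int}
    (hnd : pos.keys.Nodup) (h : i ∈ pos.getD c PySem.Set.empty) : addpos pos c i = pos := by
  have hc := contains_of_mem_getD h
  unfold addpos
  rw [if_pos hc]
  show pos.insert c (PySem.Set.add (pos.getD c PySem.Set.empty) i) = pos
  rw [PySem.Set.add_of_mem h]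
  exact pv_insert_getD_eq pos c _ hnd hc

-- ---- duplicate occurrences are no-ops: fold over lst = fold over set(lst) ----
lemma foldl_addpos_skip (h : String → Int) (c : String) :
    ∀ (ys : List String) (pos : PySem.Dict String (PySem.Set Int)),
      pos.keys.Nodup → h c ∈ pos.getD c PySem.Set.empty →
      ys.foldl (fun pos j => addpos pos j (h j)) pos
        = (ys.filter (fun y => !(y == c))).foldl (fun pos j => addpos pos j (h j)) pos := by
  intro ys
  induction ys with
  | nil => intro pos _ _; rfl
  | cons y ys ih =>
    intro pos hnd hmem
    by_cases hyc : y = c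
    · subst hyc
      simp only [List.filter_cons, beq_self_eq_true, Bool.not_true, List.foldl_cons]
      rw [addpos_of_mem hnd hmem]
      exact ih pos hnd hmem
    · have : (!(y == c)) = true := by simp [hyc]
      simp only [List.filter_cons, this, List.foldl_cons]
      exact ih _ (addpos_nodup_keys _ _ hnd) (mem_getD_addpos _ _ hmem)

lemma foldl_addpos_dedup (h : String → Int) :
    ∀ (lst : List String) (pos : PySem.Dict String (PySem.Set Int)), pos.keys.Nodup →
      lst.foldl (fun pos j => addpos pos j (h j)) pos
        = (PySem.Set.ofList lst).foldl (fun pos j => addpos pos j (h j)) pos := by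
  intro lst
  induction lst with
  | nil => intro pos _; rfl
  | cons c rest ih =>
    intro pos hnd
    rw [PySem.Set.ofList_cons]
    simp only [List.foldl_cons]
    rw [ih _ (addpos_nodup_keys _ _ hnd)]
    have := (foldl_addpos_skip h c (PySem.Set.ofList rest) _ (addpos_nodup_keys _ _ hnd)
      (mem_addpos_self pos c (h c)))
    rw [this]
    rfl

-- ---- B's firsts dict lists each distinct char with its first index ----
lemma firstsD_items (lst : List String) :
    (firstsD lst).items = (PySem.Set.ofList lst).map (fun j => (j, fIdx lst j)) := by
  induction lst using List.reverseRecOn with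
  | nil => rfl
  | append_singleton xs x ih =>
    unfold firstsD at ih ⊢
    rw [PySem.List.enumerate_append, List.foldl_append]
    have hk : ((PySem.List.enumerate xs 0).foldl
        (fun f q => if f.contains q.2 then f else f.insert q.2 q.1) PySem.Dict.empty).keys
        = PySem.Set.ofList xs := by
      show (List.map Prod.fst _) = _
      rw [ih]
      simp [List.map_map, Function.comp_def]
    have hcont : ((PySem.List.enumerate xs 0).foldl
        (fun f q => if f.contains q.2 then f else f.insert q.2 q.1) PySem.Dict.empty).contains x
        = decide (x ∈ xs) := by
      by_cases hx : x ∈ xs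
      · simp only [hx, decide_true]
        exact (PySem.Dict.contains_iff_mem_keys _ _).mpr
          (by rw [hk]; exact (PySem.Set.mem_ofList _ _).mpr hx)
      · simp only [hx, decide_false]
        cases hc : PySem.Dict.contains _ x with
        | false => rfl
        | true =>
          have hmem := (PySem.Dict.contains_iff_mem_keys _ _).mp hc
          rw [hk] at hmem
          exact absurd ((PySem.Set.mem_ofList _ _).mp hmem) hx
    rw [PySem.List.enumerate_cons, PySem.List.enumerate_nil]
    simp only [List.foldl_cons, List.foldl_nil]
    by_cases hx : x ∈ xs
    · rw [hcont, if_pos (by simp [hx]), ih]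
      rw [PySem.Set.ofList_append_singleton, PySem.Set.add_of_mem ((PySem.Set.mem_ofList _ _).mpr hx)]
      apply List.map_congr_left
      intro j hj
      have hj' : j ∈ xs := (PySem.Set.mem_ofList _ _).mp hj
      simp only [fIdx, PySem.List.index?_append_of_mem _ hj']
    · rw [hcont, if_neg (by simp [hx])]
      rw [PySem.Dict.items_insert_of_not_contains _ _ (by rw [hcont]; simp [hx]), ih]
      rw [PySem.Set.ofList_append_singleton,
        PySem.Set.add_of_not_mem (fun hmem => hx ((PySem.Set.mem_ofList _ _).mp hmem))]
      rw [List.map_append]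
      congr 1
      · apply List.map_congr_left
        intro j hj
        have hj' : j ∈ xs := (PySem.Set.mem_ofList _ _).mp hj
        simp only [fIdx, PySem.List.index?_append_of_mem _ hj']
      · simp only [List.map_cons, List.map_nil, fIdx,
          PySem.List.index?_append_singleton_self xs x hx]
        simp

-- ---- both ports build posOf ----
lemma posOf_inv (species_dict : List (String × List String)) :
    (posOf species_dict).keys.Nodup ∧ ∀ c, ((posOf species_dict).getD c PySem.Set.empty).Nodup := by
  unfold posOf
  refine foldl_pres (fun (pos : PySem.Dict String (PySem.Set Int)) => pos.keys.Nodup ∧ ∀ c, (pos.getD c PySem.Set.empty).Nodup)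
    _ ?_ _ _ ?_
  · intro pos p hpos
    refine foldl_pres (fun (pos : PySem.Dict String (PySem.Set Int)) => pos.keys.Nodup ∧ ∀ c, (pos.getD c PySem.Set.empty).Nodup)
      _ ?_ _ _ hpos
    intro acc j hacc
    exact ⟨addpos_nodup_keys _ _ hacc.1, addpos_nodup_getD _ _ hacc.2⟩
  · exact ⟨by simp [PySem.Dict.keys_empty], fun c => by rw [PySem.Dict.getD_empty]; exact List.nodup_nil⟩

-- B's per-element update is the same addpos step
lemma setdefault_modify_eq_addpos (pos : PySem.Dict String (PySem.Set Int)) (j : String) (i : Int) :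
    (pos.setdefault j PySem.Set.empty).modify j PySem.Set.empty (fun s => PySem.Set.add s i)
      = addpos pos j i := by
  unfold addpos
  by_cases hc : pos.contains j = true
  · rw [PySem.Dict.setdefault_of_contains _ _ hc, if_pos hc]
  · rw [PySem.Dict.setdefault_of_not_contains _ _ (by simpa using hc), if_neg (by simpa using hc)]

-- B's first phase, as a function of the input
def posB (species_dict : List (String × List String)) : PySem.Dict String (PySem.Set Int) :=
  (PySem.Dict.ofList species_dict).items.foldl
    (fun pos p => (firstsD p.2).items.foldl
      (fun pos q => (pos.setdefault q.1 PySem.Set.empty).modify q.1 PySem.Set.empty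
        (fun s => PySem.Set.add s q.2)) pos)
    PySem.Dict.empty

lemma posB_eq (species_dict : List (String × List String)) : posB species_dict = posOf species_dict := by
  unfold posB posOf
  have hnd := PySem.Dict.nodup_keys_ofList species_dict
  refine foldl_congr_inv (fun (pos : PySem.Dict String (PySem.Set Int)) => pos.keys.Nodup)
    _ _ _ _ (by simp [PySem.Dict.keys_empty]) ?_ ?_
  · intro acc p hp hacc
    refine foldl_pres (fun (pos : PySem.Dict String (PySem.Set Int)) => pos.keys.Nodup) _ ?_ _ _ hacc
    intro acc' q hacc'
    rw [setdefault_modify_eq_addpos]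
    exact addpos_nodup_keys _ _ hacc'
  · intro acc p hp hacc
    have hget : (PySem.Dict.ofList species_dict).getD p.1 [] = p.2 :=
      PySem.Dict.getD_of_mem_items _ (by exact hp) hnd []
    rw [hget]
    have h1 : ∀ (init : PySem.Dict String (PySem.Set Int)),
        (firstsD p.2).items.foldl (fun pos q => (pos.setdefault q.1 PySem.Set.empty).modify q.1
          PySem.Set.empty (fun s => PySem.Set.add s q.2)) init
        = (firstsD p.2).items.foldl (fun pos q => addpos pos q.1 q.2) init := by
      intro init
      exact PySem.List.foldl_congr_mem _ _ _ _
        (fun a q _ => setdefault_modify_eq_addpos a q.1 q.2)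
    rw [h1, firstsD_items, List.foldl_map]
    exact (foldl_addpos_dedup (fIdx p.2) p.2 acc hacc).symm

-- A's phase 2, as a function of pos_by_char
def phase2A (pos : PySem.Dict String (PySem.Set Int)) : PySem.Dict String (PySem.Set String) :=
  pos.keys.foldl (fun inc i =>
    let inc := if inc.contains i then inc else inc.insert i PySem.Set.empty
    pos.keys.foldl (fun inc j =>
      if i ≠ j ∧ PySem.Set.equal (pos.getD i PySem.Set.empty) (pos.getD j PySem.Set.empty) then
        inc.modify i PySem.Set.empty (fun s => PySem.Set.add s j)
      else inc) inc) PySem.Dict.empty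

-- B's phase 2, as a function of pos_by_char
def phase2B (pos : PySem.Dict String (PySem.Set Int)) : PySem.Dict String (PySem.Set String) :=
  let groups := pos.items.foldl (fun g p =>
    g.modify (pvKey p.2) [] (fun l => l ++ [p.1])) (PySem.Dict.empty : PySem.Dict (List Int) (List String))
  pos.items.foldl (fun r p =>
    r.insert p.1 (PySem.Set.ofList ((groups.getD (pvKey p.2) []).filter (fun x => x ≠ p.1))))
    PySem.Dict.empty

lemma portA_eq (species_dict : List (String × List String)) :
    create_incompatibilities species_dict = (phase2A (posOf species_dict)).items := rfl

lemma portB_eq (species_dict : List (String × List String)) :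
    create_incompatibilities_alt species_dict = (phase2B (posB species_dict)).items := rfl

-- the inner loop of A's phase 2: effect on key i, on other keys, and on the key list
lemma inner_getD_self (pos : PySem.Dict String (PySem.Set Int)) (i : String) :
    ∀ (K : List String) (inc : PySem.Dict String (PySem.Set String)),
      (K.foldl (fun inc j =>
        if i ≠ j ∧ PySem.Set.equal (pos.getD i PySem.Set.empty) (pos.getD j PySem.Set.empty) then
          inc.modify i PySem.Set.empty (fun s => PySem.Set.add s j)
        else inc) inc).getD i PySem.Set.empty
      = PySem.Set.update (inc.getD i PySem.Set.empty) (K.filter (fun j => condA pos i j)) := by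
  intro K
  induction K with
  | nil => intro inc; rw [List.filter_nil, List.foldl_nil, PySem.Set.update_nil]
  | cons j K ih =>
    intro inc
    simp only [List.foldl_cons, List.filter_cons]
    by_cases h : i ≠ j ∧ PySem.Set.equal (pos.getD i PySem.Set.empty) (pos.getD j PySem.Set.empty) = true
    · rw [if_pos h]
      have hb : condA pos i j = true := by
        unfold condA; rw [h.2]; simp [h.1]
      rw [hb, ih, PySem.Dict.getD_modify_self, if_pos rfl, PySem.Set.update_cons]
    · rw [if_neg h]
      have hb : condA pos i j = false := by
        unfold condA
        by_cases h1 : i = j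
        · simp [h1]
        · have h2 : PySem.Set.equal (pos.getD i PySem.Set.empty) (pos.getD j PySem.Set.empty) = false := by
            cases heq : PySem.Set.equal (pos.getD i PySem.Set.empty) (pos.getD j PySem.Set.empty) with
            | true => exact absurd ⟨h1, heq⟩ h
            | false => rfl
          rw [h2]; simp
      rw [hb, ih, if_neg (by simp)]

lemma inner_getD_ne (pos : PySem.Dict String (PySem.Set Int)) (i : String) {k : String} (hk : k ≠ i) :
    ∀ (K : List String) (inc : PySem.Dict String (PySem.Set String)),
      (K.foldl (fun inc j =>
        if i ≠ j ∧ PySem.Set.equal (pos.getD i PySem.Set.empty) (pos.getD j PySem.Set.empty) then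
          inc.modify i PySem.Set.empty (fun s => PySem.Set.add s j)
        else inc) inc).getD k PySem.Set.empty = inc.getD k PySem.Set.empty := by
  intro K
  induction K with
  | nil => intro inc; rfl
  | cons j K ih =>
    intro inc
    simp only [List.foldl_cons]
    rw [ih]
    split
    · exact PySem.Dict.getD_modify_of_ne _ _ _ hk
    · rfl

lemma inner_keys (pos : PySem.Dict String (PySem.Set Int)) (i : String) :
    ∀ (K : List String) (inc : PySem.Dict String (PySem.Set String)), inc.contains i = true →
      (K.foldl (fun inc j =>
        if i ≠ j ∧ PySem.Set.equal (pos.getD i PySem.Set.empty) (pos.getD j PySem.Set.empty) then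
          inc.modify i PySem.Set.empty (fun s => PySem.Set.add s j)
        else inc) inc).keys = inc.keys := by
  intro K
  induction K with
  | nil => intro inc _; rfl
  | cons j K ih =>
    intro inc hc
    simp only [List.foldl_cons]
    split
    · rw [ih _ (by rw [PySem.Dict.contains_modify]; simp)]
      rw [PySem.Dict.keys_modify, PySem.Dict.keys_insert_of_contains _ _ hc]
    · exact ih _ hc

-- the outer loop of A's phase 2
lemma outer_spec (pos : PySem.Dict String (PySem.Set Int)) :
    ∀ (l : List String) (inc : PySem.Dict String (PySem.Set String)),
      l.Nodup → (∀ x ∈ l, inc.contains x = false) →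
      ((l.foldl (fun inc i =>
          let inc := if inc.contains i then inc else inc.insert i PySem.Set.empty
          pos.keys.foldl (fun inc j =>
            if i ≠ j ∧ PySem.Set.equal (pos.getD i PySem.Set.empty) (pos.getD j PySem.Set.empty) then
              inc.modify i PySem.Set.empty (fun s => PySem.Set.add s j)
            else inc) inc) inc).keys = inc.keys ++ l)
      ∧ (∀ k ∈ l, (l.foldl (fun inc i =>
          let inc := if inc.contains i then inc else inc.insert i PySem.Set.empty
          pos.keys.foldl (fun inc j =>
            if i ≠ j ∧ PySem.Set.equal (pos.getD i PySem.Set.empty) (pos.getD j PySem.Set.empty) then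
              inc.modify i PySem.Set.empty (fun s => PySem.Set.add s j)
            else inc) inc) inc).getD k PySem.Set.empty = valA pos k)
      ∧ (∀ k, k ∉ l → (l.foldl (fun inc i =>
          let inc := if inc.contains i then inc else inc.insert i PySem.Set.empty
          pos.keys.foldl (fun inc j =>
            if i ≠ j ∧ PySem.Set.equal (pos.getD i PySem.Set.empty) (pos.getD j PySem.Set.empty) then
              inc.modify i PySem.Set.empty (fun s => PySem.Set.add s j)
            else inc) inc) inc).getD k PySem.Set.empty = inc.getD k PySem.Set.empty) := by
  intro l
  induction l with
  | nil => intro inc _ _; refine ⟨by simp, by simp, fun k _ => rfl⟩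
  | cons c l ih =>
    intro inc hndl hfree
    have hc : inc.contains c = false := hfree c (by simp)
    simp only [List.foldl_cons]
    have hstep : (if inc.contains c then inc else inc.insert c PySem.Set.empty)
        = inc.insert c PySem.Set.empty := by rw [if_neg (by simp [hc])]
    simp only [hstep]
    set inc0 := inc.insert c PySem.Set.empty with hinc0
    have hcont0 : inc0.contains c = true := PySem.Dict.contains_insert_self _ _ _
    set inner := pos.keys.foldl (fun inc j =>
        if c ≠ j ∧ PySem.Set.equal (pos.getD c PySem.Set.empty) (pos.getD j PySem.Set.empty) then
          inc.modify c PySem.Set.empty (fun s => PySem.Set.add s j)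
        else inc) inc0 with hinner
    have hkeys_inner : inner.keys = inc.keys ++ [c] := by
      rw [hinner, inner_keys pos c _ _ hcont0, hinc0,
        PySem.Dict.keys_insert_of_not_contains _ _ hc]
    have hgetc : inner.getD c PySem.Set.empty = valA pos c := by
      rw [hinner, inner_getD_self pos c, hinc0, PySem.Dict.getD_insert_self]
      exact PySem.Set.update_empty _
    have hgetne : ∀ k, k ≠ c → inner.getD k PySem.Set.empty = inc.getD k PySem.Set.empty := by
      intro k hk
      rw [hinner, inner_getD_ne pos c hk, hinc0, PySem.Dict.getD_insert_of_ne _ _ _ hk]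
    have hfree' : ∀ x ∈ l, inner.contains x = false := by
      intro x hx
      cases hcx : inner.contains x with
      | false => rfl
      | true =>
        have hmem := (PySem.Dict.contains_iff_mem_keys _ _).mp hcx
        rw [hkeys_inner] at hmem
        rcases List.mem_append.mp hmem with hm | hm
        · have hxf := hfree x (List.mem_cons_of_mem _ hx)
          have hcm := (PySem.Dict.contains_iff_mem_keys inc x).mpr hm
          rw [hxf] at hcm; cases hcm
        · have hxc : x = c := by simpa using hm
          subst hxc
          exact absurd hx (List.nodup_cons.mp hndl).1
    obtain ⟨ihk, ihin, ihout⟩ := ih inner (List.nodup_cons.mp hndl).2 hfree'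
    refine ⟨?_, ?_, ?_⟩
    · rw [ihk, hkeys_inner, List.append_assoc]; rfl
    · intro k hk
      rcases List.mem_cons.mp hk with hkc | hkl
      · subst hkc
        rw [ihout k (List.nodup_cons.mp hndl).1, hgetc]
      · exact ihin k hkl
    · intro k hk
      rw [ihout k (fun h => hk (by simp [h])), hgetne k (fun h => hk (by simp [h]))]

lemma phase2A_items (pos : PySem.Dict String (PySem.Set Int)) (hnd : pos.keys.Nodup) :
    (phase2A pos).items = pos.keys.map (fun k => (k, valA pos k)) := by
  obtain ⟨hk, hin, -⟩ := outer_spec pos pos.keys PySem.Dict.empty hnd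
    (fun x _ => PySem.Dict.contains_empty x)
  rw [PySem.Dict.keys_empty, List.nil_append] at hk
  unfold phase2A
  rw [PySem.Dict.items_eq_map_keys _ (by rw [hk]; exact hnd) PySem.Set.empty, hk]
  apply List.map_congr_left
  intro k hkmem
  rw [hin k hkmem]

lemma pvKey_eq_iff {a b : PySem.Set Int} (ha : a.Nodup) (hb : b.Nodup) :
    pvKey a = pvKey b ↔ PySem.Set.equal a b = true := by
  unfold pvKey
  rw [PySem.List.sorted_id_eq_sorted_id_iff_perm, List.perm_ext_iff_of_nodup ha hb,
    PySem.Set.equal_iff]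

lemma phase2B_items (pos : PySem.Dict String (PySem.Set Int)) (hnd : pos.keys.Nodup)
    (hv : ∀ c, (pos.getD c PySem.Set.empty).Nodup) :
    (phase2B pos).items = pos.keys.map (fun k => (k, valA pos k)) := by
  have hgroups : ∀ c, ((pos.items.foldl (fun g p => g.modify (pvKey p.2) [] (fun l => l ++ [p.1]))
      (PySem.Dict.empty : PySem.Dict (List Int) (List String))).getD c [])
      = (pos.items.filter (fun p => pvKey p.2 == c)).map (fun p => p.1) := by
    intro c
    rw [← List.foldl_map (f := fun (p : String × PySem.Set Int) => (pvKey p.2, p.1))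
      (g := fun (d : PySem.Dict (List Int) (List String)) (q : List Int × String) =>
        d.modify q.1 [] (fun l => l ++ [q.2]))]
    rw [PySem.Dict.getD_foldl_modify_append, PySem.Dict.getD_empty, List.nil_append]
    rw [List.filter_map, List.map_map]
    rfl
  show (pos.items.foldl (fun r p =>
      r.insert p.1 (PySem.Set.ofList
        (((pos.items.foldl (fun g p => g.modify (pvKey p.2) [] (fun l => l ++ [p.1]))
            (PySem.Dict.empty : PySem.Dict (List Int) (List String))).getD (pvKey p.2) []).filter
          (fun x => x ≠ p.1)))) PySem.Dict.empty).items
    = pos.keys.map (fun k => (k, valA pos k))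
  rw [PySem.Dict.items_foldl_insert_fresh pos.items (fun p => p.1) _ PySem.Dict.empty
    (fun a _ => PySem.Dict.contains_empty a.1) hnd]
  simp only [hgroups]
  show [] ++ pos.items.map _ = _
  rw [List.nil_append]
  show _ = (pos.items.map (fun p => p.1)).map (fun k => (k, valA pos k))
  rw [List.map_map]
  apply List.map_congr_left
  intro p hp
  simp only [Function.comp_apply]
  congr 1
  have hp2 : pos.getD p.1 PySem.Set.empty = p.2 := by
    exact PySem.Dict.getD_of_mem_items pos (by exact hp) hnd _
  unfold valA
  show PySem.Set.ofList _ = PySem.Set.ofList ((pos.items.map (fun x => x.1)).filter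
    (fun j => condA pos p.1 j))
  rw [List.filter_map, List.filter_map, List.filter_filter]
  congr 1
  apply congrArg
  apply List.filter_congr
  intro q hq
  have hq2 : pos.getD q.1 PySem.Set.empty = q.2 := by
    exact PySem.Dict.getD_of_mem_items pos (by exact hq) hnd _
  simp only [Function.comp_apply]
  unfold condA
  apply Bool.eq_iff_iff.mpr
  simp only [Bool.and_eq_true, beq_iff_eq, decide_eq_true_eq]
  have hnq : q.2.Nodup := by rw [← hq2]; exact hv q.1
  have hnp : p.2.Nodup := by rw [← hp2]; exact hv p.1
  constructor
  · rintro ⟨hne, hkeq⟩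
    refine ⟨Ne.symm hne, ?_⟩
    have heq : PySem.Set.equal q.2 p.2 = true := (pvKey_eq_iff hnq hnp).mp hkeq
    rw [hp2, hq2, PySem.Set.equal_iff]
    rw [PySem.Set.equal_iff] at heq
    intro x
    exact (heq x).symm
  · rintro ⟨hne, heq⟩
    refine ⟨Ne.symm hne, ?_⟩
    rw [hp2, hq2] at heq
    apply (pvKey_eq_iff hnq hnp).mpr
    rw [PySem.Set.equal_iff] at heq ⊢
    intro x
    exact (heq x).symm

-- ===== VERDICT (by name: the statement is the Claim_ definition above) =====
theorem create_incompatibilities_spec : Claim_equal_create_incompatibilities := by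
  intro species_dict _
  unfold Spec_create_incompatibilities
  rw [portA_eq, portB_eq, posB_eq]
  obtain ⟨hnd, hv⟩ := posOf_inv species_dict
  rw [phase2A_items _ hnd, phase2B_items _ hnd hv]
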